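-- pv_equiv track=rewrite | github.com/opsiff/shisanshui | all.py | Zhadan
-- ===== SOURCE A (Python) =====
-- def Zhadan(five_list):
--     mapcheck = {}
--     for i in five_list:
--         if (mapcheck.__contains__(i[1]) == True):
--             # Python 3.X Not use has_key instead of __contains__
--             mapcheck[i[1]] += 1
--         else:
--             mapcheck[i[1]] = 1
--     for i in five_list:
--         if mapcheck[i[1]] >= 4:
--             return True
--     return False
-- ===== SOURCE B (Python) =====
-- def Zhadan(five_list):
--     # Sort the second elements, then a run of 4 consecutive equal values
--     # (vals[i] == vals[i+3]) exists iff some value occurs >= 4 times.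
--     vals = sorted(i[1] for i in five_list)
--     for i in range(len(vals) - 3):
--         if vals[i] == vals[i + 3]:
--             return True
--     return False
-- ===== Notes on version B (the rewrite author's own statement) =====
-- stated objective: idiomatic
-- what changed: Replaces the frequency-dictionary build-and-rescan (two passes plus hashing) with sort-then-scan: sort the second elements and report whether some value occupies four consecutive sorted positions.
import Mathlib
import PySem

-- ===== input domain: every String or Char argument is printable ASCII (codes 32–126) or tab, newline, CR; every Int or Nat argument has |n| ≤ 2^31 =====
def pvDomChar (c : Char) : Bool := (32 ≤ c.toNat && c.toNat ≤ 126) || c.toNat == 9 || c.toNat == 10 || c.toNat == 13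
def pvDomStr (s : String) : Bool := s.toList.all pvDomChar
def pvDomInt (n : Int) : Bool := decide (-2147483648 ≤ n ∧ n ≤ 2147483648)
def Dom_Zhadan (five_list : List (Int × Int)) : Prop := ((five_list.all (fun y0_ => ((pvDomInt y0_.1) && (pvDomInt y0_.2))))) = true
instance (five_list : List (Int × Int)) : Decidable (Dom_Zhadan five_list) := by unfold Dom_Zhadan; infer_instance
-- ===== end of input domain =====

-- B replaces A's frequency-dictionary build-and-rescan with an idiomatic
-- sort-then-scan for a run of four equal consecutive values; proved equal on all inputs.


-- ===== PORT A =====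
-- first loop: build mapcheck; '+=' on a present key / '= 1' on an absent one.
-- second loop: 'return True' at the first element whose count is ≥ 4 (List.any).
-- mapcheck[i[1]] in the second loop is exact as getD: every key i[1] was inserted by the first loop.
def Zhadan (five_list : List (Int × Int)) : Bool :=
  let mapcheck := five_list.foldl (fun d i =>
    if d.contains i.2 then d.insert i.2 (d.getD i.2 0 + 1) else d.insert i.2 1)
    PySem.Dict.empty
  five_list.any (fun i => decide ((4 : Int) ≤ mapcheck.getD i.2 0))

-- ===== PORT B =====
-- the index scan 'for i in range(len(vals)-3): vals[i] == vals[i+3]' ported as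
-- structural recursion over the sorted list: each step compares a window's ends.
def ZhadanRun4 : List Int → Bool
  | a :: b :: c :: d :: t => a == d || ZhadanRun4 (b :: c :: d :: t)
  | _ => false

def Zhadan_alt (five_list : List (Int × Int)) : Bool :=
  ZhadanRun4 (PySem.List.sorted (five_list.map Prod.snd) (fun x => x) false)

-- ===== PRECONDITION & SPEC =====
def Spec_Zhadan (five_list : List (Int × Int)) (out : Bool) : Prop := out = Zhadan_alt five_list
instance (five_list : List (Int × Int)) (out : Bool) : Decidable (Spec_Zhadan five_list out) := by unfold Spec_Zhadan; infer_instance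

-- ===== CLAIM (what is proved, stated in full; the proofs are below) =====
def Claim_equal_Zhadan : Prop := ∀ (five_list : List (Int × Int)), Dom_Zhadan five_list → Spec_Zhadan five_list (Zhadan five_list)

-- ===== LEMMAS AND PROOFS =====

-- A's branching fold is the plain counting fold.
lemma zhadan_fold_eq (l : List (Int × Int)) (d : PySem.Dict Int Int) :
    l.foldl (fun d i =>
      if d.contains i.2 then d.insert i.2 (d.getD i.2 0 + 1) else d.insert i.2 1) d
    = (l.map Prod.snd).foldl (fun d x => d.insert x (d.getD x 0 + 1)) d := by
  induction l generalizing d with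
  | nil => rfl
  | cons a t ih =>
    simp only [List.foldl_cons, List.map_cons]
    rw [ih]
    congr 1
    by_cases h : d.contains a.2 = true
    · simp [h]
    · have h0 : d.getD a.2 0 = 0 := PySem.Dict.getD_of_not_contains d 0 (by simpa using h)
      simp [h, h0]

lemma zhadan_true_iff (l : List (Int × Int)) :
    Zhadan l = true ↔ ∃ v, 4 ≤ (l.map Prod.snd).count v := by
  unfold Zhadan
  rw [zhadan_fold_eq]
  simp only [List.any_eq_true, decide_eq_true_eq,
    PySem.Dict.getD_foldl_insert_add_one, PySem.Dict.getD_empty, zero_add]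
  constructor
  · rintro ⟨i, hi, hc⟩
    exact ⟨i.2, by exact_mod_cast hc⟩
  · rintro ⟨v, hv⟩
    have hmem : v ∈ l.map Prod.snd := List.count_pos_iff.mp (by omega)
    obtain ⟨i, hi, rfl⟩ := List.mem_map.mp hmem
    exact ⟨i, hi, by exact_mod_cast hv⟩

-- no value fits four times into a list of at most three elements
lemma count_lt_four_of_short (x : Int) (m : List Int) (hm : m.length ≤ 3) :
    List.count x m < 4 :=
  lt_of_le_of_lt (le_trans (List.count_le_length) hm) (by norm_num)

-- in a (≤)-sorted list, a head-to-fourth match forces four equal elements, and conversely.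
lemma run4_true_iff (l : List Int) (hs : l.Pairwise (· ≤ ·)) :
    ZhadanRun4 l = true ↔ ∃ v, 4 ≤ l.count v := by
  induction l with
  | nil => simp [ZhadanRun4]
  | cons a t ih =>
    match t, hs, ih with
    | [], _, _ =>
      refine iff_of_false (by rw [show ZhadanRun4 [a] = false from rfl]; simp) ?_
      rintro ⟨v, hv⟩
      exact absurd hv (not_le.mpr (count_lt_four_of_short v _ (by simp)))
    | [b], _, _ =>
      refine iff_of_false (by rw [show ZhadanRun4 [a, b] = false from rfl]; simp) ?_
      rintro ⟨v, hv⟩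
      exact absurd hv (not_le.mpr (count_lt_four_of_short v _ (by simp)))
    | [b, c], _, _ =>
      refine iff_of_false (by rw [show ZhadanRun4 [a, b, c] = false from rfl]; simp) ?_
      rintro ⟨v, hv⟩
      exact absurd hv (not_le.mpr (count_lt_four_of_short v _ (by simp)))
    | b :: c :: d :: r, hs, ih =>
      have hab : a ≤ b := (List.pairwise_cons.mp hs).1 b (by simp)
      have hstail : (b :: c :: d :: r).Pairwise (· ≤ ·) := (List.pairwise_cons.mp hs).2
      have hbc : b ≤ c := (List.pairwise_cons.mp hstail).1 c (by simp)
      have hs3 : (c :: d :: r).Pairwise (· ≤ ·) := (List.pairwise_cons.mp hstail).2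
      have hcd : c ≤ d := (List.pairwise_cons.mp hs3).1 d (by simp)
      have hs4 : (d :: r).Pairwise (· ≤ ·) := (List.pairwise_cons.mp hs3).2
      have hdr : ∀ x ∈ d :: r, d ≤ x := by
        intro x hx
        rcases List.mem_cons.mp hx with h | h
        · exact h.symm.le
        · exact (List.pairwise_cons.mp hs4).1 x h
      rw [show ZhadanRun4 (a :: b :: c :: d :: r) = (a == d || ZhadanRun4 (b :: c :: d :: r)) from rfl]
      rcases eq_or_ne a d with had | had
      · simp only [had, BEq.rfl, Bool.true_or, true_iff]
        have hb : b = d := le_antisymm (hbc.trans hcd) (had ▸ hab)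
        have hc : c = d := le_antisymm hcd (had ▸ (hab.trans hbc))
        refine ⟨d, ?_⟩
        subst had hb hc
        simp
      · have hne : (a == d) = false := beq_eq_false_iff_ne.mpr had
        simp only [hne, Bool.false_or]
        rw [ih hstail]
        constructor
        · rintro ⟨v, hv⟩
          exact ⟨v, le_trans hv ((List.sublist_cons_self a _).count_le v)⟩
        · rintro ⟨v, hv⟩
          refine ⟨v, ?_⟩
          by_cases hva : v = a
          · exfalso
            subst hva
            have hvt : 3 ≤ (b :: c :: d :: r).count v := by
              rw [List.count_cons_self] at hv; omega
            have hsplit : (b :: c :: d :: r).count v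
                = ([b, c]).count v + (d :: r).count v := by
              rw [show b :: c :: d :: r = [b, c] ++ d :: r from rfl, List.count_append]
            have hbc2 : ([b, c]).count v ≤ 2 := le_trans (List.count_le_length) (by simp)
            have hmem : v ∈ d :: r := by
              by_contra hnm
              rw [List.count_eq_zero.mpr hnm] at hsplit
              omega
            exact had (le_antisymm ((hab.trans hbc).trans hcd) (hdr v hmem))
          · rwa [List.count_cons_of_ne (Ne.symm hva)] at hv

lemma zhadan_alt_true_iff (l : List (Int × Int)) :
    Zhadan_alt l = true ↔ ∃ v, 4 ≤ (l.map Prod.snd).count v := by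
  unfold Zhadan_alt
  have hperm := PySem.List.sorted_perm (l.map Prod.snd) (fun x => x) false
  rw [run4_true_iff _ (by simpa using PySem.List.sorted_pairwise (xs := l.map Prod.snd) (key := fun x => x))]
  constructor
  · rintro ⟨v, hv⟩
    exact ⟨v, by rwa [hperm.count_eq] at hv⟩
  · rintro ⟨v, hv⟩
    exact ⟨v, by rwa [hperm.count_eq]⟩

-- ===== VERDICT (by name: the statement is the Claim_ definition above) =====
theorem Zhadan_spec : Claim_equal_Zhadan := by
  intro l _
  unfold Spec_Zhadan
  have := (zhadan_true_iff l).trans (zhadan_alt_true_iff l).symm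
  exact Bool.coe_iff_coe.mp this
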